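-- pv_equiv track=rewrite | github.com/BoudewijnKlijn/competitive_programming | leetcode/leetcode_2410.py | using_dicts
-- ===== SOURCE A (Python) =====
-- from collections import Counter, deque
-- from typing import List
--
-- def using_dicts(players: List[int], trainers: List[int]) -> int:
--     count_players = dict(sorted(Counter(players).items()))
--     count_trainers = dict(sorted(Counter(trainers).items()))
--
--     ans = 0
--     for player_level, player_count in count_players.items():
--         while count_trainers and player_count:
--             remove = set()
--             for trainer_level, trainer_count in count_trainers.items():
--                 if trainer_level >= player_level:
--                     if player_count > trainer_count:
--                         ans += trainer_count
--                         player_count -= trainer_count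
--                         count_trainers[trainer_level] = 0
--                     else:
--                         ans += player_count
--                         count_trainers[trainer_level] = trainer_count - player_count
--                         player_count = 0
--                     if count_trainers[trainer_level] == 0:
--                         remove.add(trainer_level)
--                     if player_count == 0:
--                         break
--                 else:
--                     remove.add(trainer_level)
--
--             # remove trainers which have no spot left
--             for trainer_level in remove:
--                 del count_trainers[trainer_level]
--
--     return ans
-- ===== SOURCE B (Python) =====
-- def using_dicts(players, trainers):
--     ps = sorted(players)
--     i = 0
--     ans = 0
--     for t in sorted(trainers):
--         if i < len(ps) and ps[i] <= t:
--             i += 1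
--             ans += 1
--     return ans
-- ===== Notes on version B (the rewrite author's own statement) =====
-- stated objective: faster
-- what changed: B replaces A's counter dicts and repeated scans of the trainer dict for every player level by sorting both lists once and doing a single two-pointer greedy sweep over the sorted trainers.
import Mathlib
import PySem

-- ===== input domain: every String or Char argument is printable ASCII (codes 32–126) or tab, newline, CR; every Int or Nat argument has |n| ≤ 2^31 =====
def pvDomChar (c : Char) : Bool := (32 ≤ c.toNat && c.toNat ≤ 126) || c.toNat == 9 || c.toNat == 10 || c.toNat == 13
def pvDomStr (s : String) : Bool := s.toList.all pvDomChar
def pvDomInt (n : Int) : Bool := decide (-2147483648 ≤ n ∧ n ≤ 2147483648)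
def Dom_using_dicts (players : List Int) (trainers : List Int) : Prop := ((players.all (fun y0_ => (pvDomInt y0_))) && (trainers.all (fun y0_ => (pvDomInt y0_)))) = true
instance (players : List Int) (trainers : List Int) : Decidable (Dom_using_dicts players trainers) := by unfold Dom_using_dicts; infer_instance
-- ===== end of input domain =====

-- B replaces A's per-player-level rescans of the trainer dict by one sorted two-pointer sweep (objective: faster).

-- ===== PORT A =====
-- the inner `for trainer_level, trainer_count in count_trainers.items(): …` loop:
-- state (ans, player_count, dict items so far, remove-set); `break` returns with the rest of the items untouched
def forA (p ans pc : Int) (items : List (Int × Int)) (rm : PySem.Set Int) :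
    Int × Int × List (Int × Int) × PySem.Set Int :=
  match items with
  | [] => (ans, pc, [], rm)
  | (t, tc) :: rest =>
    if p ≤ t then                                  -- trainer_level >= player_level
      if tc < pc then                              -- player_count > trainer_count
        let ans' := ans + tc
        let pc' := pc - tc
        let v : Int := 0                           -- count_trainers[trainer_level] = 0
        let rm' := if v = 0 then PySem.Set.add rm t else rm
        if pc' = 0 then (ans', pc', (t, v) :: rest, rm')      -- break
        else
          let r := forA p ans' pc' rest rm'
          (r.1, r.2.1, (t, v) :: r.2.2.1, r.2.2.2)
      else
        let v := tc - pc                           -- count_trainers[trainer_level] = trainer_count - player_count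
        let ans' := ans + pc
        let pc' : Int := 0
        let rm' := if v = 0 then PySem.Set.add rm t else rm
        if pc' = 0 then (ans', pc', (t, v) :: rest, rm')      -- break
        else
          let r := forA p ans' pc' rest rm'
          (r.1, r.2.1, (t, v) :: r.2.2.1, r.2.2.2)
    else
      let rm' := PySem.Set.add rm t
      let r := forA p ans pc rest rm'
      (r.1, r.2.1, (t, tc) :: r.2.2.1, r.2.2.2)

-- `for trainer_level in remove: del count_trainers[trainer_level]` is a fold of erasures; it acts as a filter
lemma eraseFold_items : ∀ (rm : List Int) (l : List (Int × Int)),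
    (List.foldl (fun (dd : PySem.Dict Int Int) k => dd.erase k) (PySem.Dict.mk l) rm).items
      = l.filter (fun kv => !(rm.contains kv.1)) := by
  intro rm
  induction rm with
  | nil => intro l; simp
  | cons k rm ih =>
    intro l
    rw [List.foldl_cons]
    have h1 : (PySem.Dict.mk l).erase k = PySem.Dict.mk (l.filter (fun p => !(p.1 == k))) := rfl
    rw [h1, ih, List.filter_filter]
    apply List.filter_congr
    intro kv _
    simp only [List.contains_cons, Bool.not_or]
    rw [Bool.and_comm, BEq.comm]

-- after one full pass of the inner loop, either player_count is 0 or every surviving key is in the remove set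
-- (this is what makes A's `while` loop run its body at most once); cited by whileA's decreasing_by
lemma forA_post (p : Int) : ∀ (items : List (Int × Int)) (ans pc : Int) (rm : PySem.Set Int),
    (∀ x ∈ rm, x ∈ (forA p ans pc items rm).2.2.2) ∧
    ((forA p ans pc items rm).2.1 = 0 ∨
      ∀ kv ∈ (forA p ans pc items rm).2.2.1, kv.1 ∈ (forA p ans pc items rm).2.2.2) := by
  intro items
  induction items with
  | nil => intro ans pc rm; simp [forA]
  | cons hd rest ih =>
    intro ans pc rm
    obtain ⟨t, tc⟩ := hd
    by_cases h1 : p ≤ t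
    · by_cases h2 : tc < pc
      · have hpc : ¬ (pc - tc = 0) := by omega
        simp only [forA, if_pos h1, if_pos h2, reduceIte, if_neg hpc]
        obtain ⟨ihm, ihp⟩ := ih (ans + tc) (pc - tc) (PySem.Set.add rm t)
        refine ⟨fun x hx => ihm x (by rw [PySem.Set.mem_add]; exact Or.inl hx), ?_⟩
        rcases ihp with h | h
        · exact Or.inl h
        · refine Or.inr fun kv hkv => ?_
          rcases List.mem_cons.mp hkv with rfl | hkv
          · exact ihm t (by rw [PySem.Set.mem_add]; exact Or.inr rfl)
          · exact h kv hkv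
      · refine ⟨?_, Or.inl ?_⟩
        · intro x hx
          simp only [forA, if_pos h1, if_neg h2, reduceIte]
          by_cases h3 : tc - pc = 0
          · rw [if_pos h3, PySem.Set.mem_add]; exact Or.inl hx
          · rw [if_neg h3]; exact hx
        · simp only [forA, if_pos h1, if_neg h2, reduceIte]
    · simp only [forA, if_neg h1]
      obtain ⟨ihm, ihp⟩ := ih ans pc (PySem.Set.add rm t)
      refine ⟨fun x hx => ihm x (by rw [PySem.Set.mem_add]; exact Or.inl hx), ?_⟩
      rcases ihp with h | h
      · exact Or.inl h
      · refine Or.inr fun kv hkv => ?_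
        rcases List.mem_cons.mp hkv with rfl | hkv
        · exact ihm t (by rw [PySem.Set.mem_add]; exact Or.inr rfl)
        · exact h kv hkv

-- `while count_trainers and player_count:` with the inner for-loop and the remove-set deletions as its body
def whileA (p ans pc : Int) (d : PySem.Dict Int Int) : Int × PySem.Dict Int Int :=
  if d.items ≠ [] ∧ pc ≠ 0 then
    let r := forA p ans pc d.items []
    let d' := List.foldl (fun (dd : PySem.Dict Int Int) k => dd.erase k) (PySem.Dict.mk r.2.2.1) r.2.2.2
    whileA p r.1 r.2.1 d'
  else (ans, d)
  termination_by (if pc = 0 ∨ d.items = [] then 0 else 1 : Nat)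
  decreasing_by
    rename_i h
    have hpost := forA_post p d.items ans pc []
    have h1 : (if pc = 0 ∨ d.items = [] then 0 else 1 : Nat) = 1 := by
      rw [if_neg]; push_neg; exact ⟨h.2, h.1⟩
    rw [h1]
    have h0 : (if (forA p ans pc d.items []).2.1 = 0 ∨
        (List.foldl (fun (dd : PySem.Dict Int Int) k => dd.erase k)
          (PySem.Dict.mk (forA p ans pc d.items []).2.2.1) (forA p ans pc d.items []).2.2.2).items = []
        then 0 else 1 : Nat) = 0 := by
      rw [if_pos]
      rcases hpost.2 with hz | hall
      · exact Or.inl hz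
      · refine Or.inr ?_
        rw [eraseFold_items]
        rw [List.filter_eq_nil_iff]
        intro kv hkv
        simp only [Bool.not_eq_true', Bool.not_eq_false]
        exact List.contains_iff_mem.mpr (hall kv hkv)
    omega

def using_dicts (players : List Int) (trainers : List Int) : Int :=
  let count_players := PySem.Dict.ofList
    (PySem.List.sorted2 (PySem.Dict.counter players).items Prod.fst Prod.snd)
  let count_trainers := PySem.Dict.ofList
    (PySem.List.sorted2 (PySem.Dict.counter trainers).items Prod.fst Prod.snd)
  (count_players.items.foldl
    (fun (st : Int × PySem.Dict Int Int) kv => whileA kv.1 st.1 kv.2 st.2)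
    (0, count_trainers)).1

-- ===== PORT B =====
-- body of `for t in sorted(trainers):` over the state (i, ans)
def altGo (ps : List Int) (st : Nat × Int) (t : Int) : Nat × Int :=
  if st.1 < ps.length ∧ ps.getD st.1 0 ≤ t then (st.1 + 1, st.2 + 1) else st

def using_dicts_alt (players : List Int) (trainers : List Int) : Int :=
  ((PySem.List.sorted trainers (fun x => x)).foldl
    (altGo (PySem.List.sorted players (fun x => x))) (0, 0)).2

-- ===== PRECONDITION & SPEC =====
def Spec_using_dicts (players : List Int) (trainers : List Int) (out : Int) : Prop := out = using_dicts_alt players trainers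
instance (players : List Int) (trainers : List Int) (out : Int) : Decidable (Spec_using_dicts players trainers out) := by unfold Spec_using_dicts; infer_instance

-- ===== CLAIM (what is proved, stated in full; the proofs are below) =====
def Claim_equal_using_dicts : Prop := ∀ (players : List Int) (trainers : List Int), Dom_using_dicts players trainers → Spec_using_dicts players trainers (using_dicts players trainers)

-- ===== LEMMAS AND PROOFS =====

-- the common greedy both programs compute: walk the trainers in the given order, matching the front player when it fits
def gMatch : List Int → List Int → Int
  | _, [] => 0
  | [], _ :: _ => 0
  | p :: ps, t :: ts => if p ≤ t then 1 + gMatch ps ts else gMatch (p :: ps) ts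
  termination_by xs ts => ts.length

lemma gMatch_nil_left : ∀ ts, gMatch [] ts = 0 := by
  intro ts; cases ts <;> simp [gMatch]

lemma gMatch_nil_right : ∀ xs, gMatch xs [] = 0 := by
  intro xs; cases xs <;> simp [gMatch]

-- a sorted counter's items, flattened back into the plain sorted list
def expand (l : List (Int × Int)) : List Int := l.flatMap (fun kv => List.replicate kv.2.toNat kv.1)

-- pure one-pass form of A's inner for-loop: (matches made for this player batch, surviving trainer items)
def passT (p c : Int) : List (Int × Int) → Int × List (Int × Int)
  | [] => (0, [])
  | (t, tc) :: rest =>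
    if p ≤ t then
      if tc < c then
        let r := passT p (c - tc) rest
        (tc + r.1, r.2)
      else
        (c, if tc = c then rest else (t, tc - c) :: rest)
    else passT p c rest

lemma passT_counts (p : Int) : ∀ (items : List (Int × Int)) (c : Int),
    (∀ kv ∈ items, 1 ≤ kv.2) → ∀ kv ∈ (passT p c items).2, 1 ≤ kv.2 := by
  intro items
  induction items with
  | nil => intro c h kv hkv; simp [passT] at hkv
  | cons hd rest ih =>
    intro c h kv hkv
    obtain ⟨t, tc⟩ := hd
    have htc : (1:Int) ≤ tc := h (t, tc) (List.mem_cons_self)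
    have hrest : ∀ kv ∈ rest, (1:Int) ≤ kv.2 := fun kv hkv => h kv (List.mem_cons_of_mem _ hkv)
    by_cases h1 : p ≤ t
    · by_cases h2 : tc < c
      · simp only [passT, if_pos h1, if_pos h2] at hkv
        exact ih (c - tc) hrest kv hkv
      · simp only [passT, if_pos h1, if_neg h2] at hkv
        by_cases h3 : tc = c
        · rw [if_pos h3] at hkv; exact hrest kv hkv
        · rw [if_neg h3] at hkv
          rcases List.mem_cons.mp hkv with rfl | hkv
          · simp only; omega
          · exact hrest kv hkv
    · simp only [passT, if_neg h1] at hkv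
      exact ih c hrest kv hkv

lemma passT_keys_sublist (p : Int) : ∀ (items : List (Int × Int)) (c : Int),
    ((passT p c items).2.map Prod.fst).Sublist (items.map Prod.fst) := by
  intro items
  induction items with
  | nil => intro c; simp [passT]
  | cons hd rest ih =>
    intro c
    obtain ⟨t, tc⟩ := hd
    by_cases h1 : p ≤ t
    · by_cases h2 : tc < c
      · simp only [passT, if_pos h1, if_pos h2]
        exact List.Sublist.cons _ (ih (c - tc))
      · simp only [passT, if_pos h1, if_neg h2]
        by_cases h3 : tc = c
        · rw [if_pos h3]; exact List.Sublist.cons _ (List.Sublist.refl _)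
        · rw [if_neg h3]; simp
    · simp only [passT, if_neg h1]
      exact List.Sublist.cons _ (ih c)

-- a trainer below the front player is skipped, however many copies of it there are
lemma gMatch_skip (p t : Int) (hlt : t < p) : ∀ (n : Nat) (xs ts : List Int),
    gMatch (p :: xs) (List.replicate n t ++ ts) = gMatch (p :: xs) ts := by
  intro n
  induction n with
  | zero => intro xs ts; simp
  | succ n ih =>
    intro xs ts
    rw [List.replicate_succ, List.cons_append]
    rw [gMatch]
    rw [if_neg (by omega)]
    exact ih xs ts

-- m copies of trainer t consume m front copies of player p when p ≤ t
lemma gMatch_consume_players (p t : Int) (hle : p ≤ t) : ∀ (m k : Nat) (xs ts : List Int),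
    gMatch (List.replicate (m + k) p ++ xs) (List.replicate m t ++ ts)
      = m + gMatch (List.replicate k p ++ xs) ts := by
  intro m
  induction m with
  | zero => intro k xs ts; simp
  | succ m ih =>
    intro k xs ts
    have : m + 1 + k = (m + k) + 1 := by omega
    rw [this, List.replicate_succ (n := m), List.replicate_succ (n := m + k), List.cons_append,
      List.cons_append, gMatch, if_pos hle, ih k xs ts]
    push_cast; ring

-- m front copies of player p consume m copies of trainer t when p ≤ t
lemma gMatch_consume_trainers (p t : Int) (hle : p ≤ t) : ∀ (m k : Nat) (xs ts : List Int),
    gMatch (List.replicate m p ++ xs) (List.replicate (m + k) t ++ ts)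
      = m + gMatch xs (List.replicate k t ++ ts) := by
  intro m
  induction m with
  | zero => intro k xs ts; simp
  | succ m ih =>
    intro k xs ts
    have : m + 1 + k = (m + k) + 1 := by omega
    rw [this, List.replicate_succ (n := m), List.replicate_succ (n := m + k), List.cons_append,
      List.cons_append, gMatch, if_pos hle, ih k xs ts]
    push_cast; ring

-- the simulation step: one player batch against the trainer items equals one pass of A's inner loop
lemma gMatch_pass (p : Int) : ∀ (items : List (Int × Int)) (c : Int) (ps : List Int),
    1 ≤ c → (∀ kv ∈ items, 1 ≤ kv.2) →
    gMatch (List.replicate c.toNat p ++ ps) (expand items)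
      = (passT p c items).1 + gMatch ps (expand (passT p c items).2) := by
  intro items
  induction items with
  | nil =>
    intro c ps hc _
    simp only [passT, expand, List.flatMap_nil]
    rw [gMatch_nil_right, gMatch_nil_right]
    simp
  | cons hd rest ih =>
    intro c ps hc h
    obtain ⟨t, tc⟩ := hd
    have htc : (1:Int) ≤ tc := h (t, tc) List.mem_cons_self
    have hrest : ∀ kv ∈ rest, (1:Int) ≤ kv.2 := fun kv hkv => h kv (List.mem_cons_of_mem _ hkv)
    have hex : expand ((t, tc) :: rest) = List.replicate tc.toNat t ++ expand rest := by
      simp [expand]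
    by_cases h1 : p ≤ t
    · by_cases h2 : tc < c
      · -- the whole trainer count is consumed, the player batch continues
        have hsplit : c.toNat = tc.toNat + (c - tc).toNat := by omega
        rw [hex, hsplit, gMatch_consume_players p t h1 tc.toNat (c - tc).toNat ps (expand rest),
          ih (c - tc) ps (by omega) hrest]
        simp only [passT, if_pos h1, if_pos h2]
        push_cast [Int.toNat_of_nonneg (by omega : (0:Int) ≤ tc)]
        ring
      · -- the player batch is exhausted here (break)
        have hsplit : tc.toNat = c.toNat + (tc - c).toNat := by omega
        rw [hex, hsplit, gMatch_consume_trainers p t h1 c.toNat (tc - c).toNat ps (expand rest)]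
        simp only [passT, if_pos h1, if_neg h2]
        have hout : expand (if tc = c then rest else (t, tc - c) :: rest)
            = List.replicate (tc - c).toNat t ++ expand rest := by
          by_cases h3 : tc = c
          · rw [if_pos h3]; simp [h3]
          · rw [if_neg h3]; simp [expand]
        rw [hout]
        push_cast [Int.toNat_of_nonneg (by omega : (0:Int) ≤ c)]
        ring
    · -- trainer below the player batch: dropped on both sides
      have hc0 : c.toNat = c.toNat - 1 + 1 := by omega
      rw [hex, hc0, List.replicate_succ, List.cons_append,
        gMatch_skip p t (by omega) tc.toNat _ (expand rest), ← List.cons_append,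
        ← List.replicate_succ, ← hc0, ih c ps hc hrest]
      simp only [passT, if_neg h1]

-- forA's result, expressed through passT: ans' = ans + matches, and the post-deletion items are passT's items
lemma forA_sim (p : Int) : ∀ (items : List (Int × Int)) (ans pc : Int) (rm : PySem.Set Int),
    1 ≤ pc → (∀ kv ∈ items, 1 ≤ kv.2) → (items.map Prod.fst).Nodup →
    (∀ kv ∈ items, kv.1 ∉ rm) →
    (forA p ans pc items rm).1 = ans + (passT p pc items).1 ∧
    (forA p ans pc items rm).2.2.1.filter
        (fun kv => !((forA p ans pc items rm).2.2.2.contains kv.1)) = (passT p pc items).2 ∧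
    (∀ x ∈ rm, x ∈ (forA p ans pc items rm).2.2.2) ∧
    (∀ x ∈ (forA p ans pc items rm).2.2.2, x ∈ rm ∨ x ∈ items.map Prod.fst) := by
  intro items
  induction items with
  | nil =>
    intro ans pc rm hpc hcnt hnd hdisj
    simp [forA, passT]
  | cons hd rest ih =>
    intro ans pc rm hpc hcnt hnd hdisj
    obtain ⟨t, tc⟩ := hd
    have htc : (1:Int) ≤ tc := hcnt (t, tc) List.mem_cons_self
    have hrest : ∀ kv ∈ rest, (1:Int) ≤ kv.2 := fun kv hkv => hcnt kv (List.mem_cons_of_mem _ hkv)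
    have hnd' : t ∉ rest.map Prod.fst ∧ (rest.map Prod.fst).Nodup := by
      rw [List.map_cons, List.nodup_cons] at hnd; exact hnd
    have hndr : (rest.map Prod.fst).Nodup := hnd'.2
    have htnr : ∀ kv ∈ rest, kv.1 ≠ t := by
      intro kv hkv heq
      exact hnd'.1 (heq ▸ List.mem_map_of_mem hkv)
    have hdisjr : ∀ kv ∈ rest, kv.1 ∉ rm := fun kv hkv => hdisj kv (List.mem_cons_of_mem _ hkv)
    have hdisjr' : ∀ kv ∈ rest, kv.1 ∉ PySem.Set.add rm t := by
      intro kv hkv hmem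
      rcases (PySem.Set.mem_add rm t kv.1).mp hmem with h | h
      · exact hdisjr kv hkv h
      · exact htnr kv hkv h
    by_cases h1 : p ≤ t
    · by_cases h2 : tc < pc
      · have hpc' : ¬ (pc - tc = 0) := by omega
        simp only [forA, if_pos h1, if_pos h2, reduceIte, if_neg hpc']
        obtain ⟨ih1, ih2, ih3, ih4⟩ := ih (ans + tc) (pc - tc) (PySem.Set.add rm t)
          (by omega) hrest hndr hdisjr'
        refine ⟨?_, ?_, ?_, ?_⟩
        · simp only [passT, if_pos h1, if_pos h2]; rw [ih1]; ring
        · have hin : ((forA p (ans + tc) (pc - tc) rest (PySem.Set.add rm t)).2.2.2.contains t)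
              = true := List.contains_iff_mem.mpr (ih3 t ((PySem.Set.mem_add rm t t).mpr (Or.inr rfl)))
          simp only [passT, if_pos h1, if_pos h2, List.filter_cons, hin, Bool.not_true, Bool.false_eq_true, reduceIte]
          exact ih2
        · intro x hx
          exact ih3 x ((PySem.Set.mem_add rm t x).mpr (Or.inl hx))
        · intro x hx
          rcases ih4 x hx with h | h
          · rcases (PySem.Set.mem_add rm t x).mp h with h' | h'
            · exact Or.inl h'
            · exact Or.inr (by rw [List.map_cons]; exact List.mem_cons.mpr (Or.inl h'))
          · exact Or.inr (by rw [List.map_cons]; exact List.mem_cons_of_mem _ h)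
      · -- break branch: player batch exhausted here
        simp only [forA, if_pos h1, if_neg h2, reduceIte]
        simp only [passT, if_pos h1, if_neg h2]
        by_cases h3 : tc - pc = 0
        · have h3' : tc = pc := by omega
          rw [if_pos h3, if_pos h3']
          refine ⟨by simp, ?_, ?_, ?_⟩
          · have hin : ((PySem.Set.add rm t).contains t) = true :=
              List.contains_iff_mem.mpr ((PySem.Set.mem_add rm t t).mpr (Or.inr rfl))
            simp only [List.filter_cons, hin, Bool.not_true, Bool.false_eq_true, reduceIte]
            rw [List.filter_eq_self]
            intro kv hkv
            have hck : (rm.add t).contains kv.1 = false := by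
              rw [Bool.eq_false_iff]
              intro hc
              exact hdisjr' kv hkv (List.contains_iff_mem.mp hc)
            simp only [hck, Bool.not_false]
          · intro x hx; exact (PySem.Set.mem_add rm t x).mpr (Or.inl hx)
          · intro x hx
            rcases (PySem.Set.mem_add rm t x).mp hx with h | h
            · exact Or.inl h
            · exact Or.inr (by simp [h])
        · have h3' : ¬ (tc = pc) := by omega
          rw [if_neg h3, if_neg h3']
          refine ⟨by simp, ?_, ?_, ?_⟩
          · have hct : rm.contains t = false := by
              rw [Bool.eq_false_iff]
              intro hc
              exact hdisj (t, tc) List.mem_cons_self (List.contains_iff_mem.mp hc)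
            simp only [List.filter_cons, hct, Bool.not_false, reduceIte]
            congr 1
            rw [List.filter_eq_self]
            intro kv hkv
            have hck : rm.contains kv.1 = false := by
              rw [Bool.eq_false_iff]
              intro hc
              exact hdisjr kv hkv (List.contains_iff_mem.mp hc)
            simp only [hck, Bool.not_false]
          · intro x hx; exact hx
          · intro x hx; exact Or.inl hx
    · simp only [forA, if_neg h1]
      obtain ⟨ih1, ih2, ih3, ih4⟩ := ih ans pc (PySem.Set.add rm t) hpc hrest hndr hdisjr'
      refine ⟨?_, ?_, ?_, ?_⟩
      · simp only [passT, if_neg h1]; exact ih1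
      · have hin : ((forA p ans pc rest (PySem.Set.add rm t)).2.2.2.contains t) = true :=
          List.contains_iff_mem.mpr (ih3 t ((PySem.Set.mem_add rm t t).mpr (Or.inr rfl)))
        simp only [passT, if_neg h1, List.filter_cons, hin, Bool.not_true, Bool.false_eq_true, reduceIte]
        exact ih2
      · intro x hx
        exact ih3 x ((PySem.Set.mem_add rm t x).mpr (Or.inl hx))
      · intro x hx
        rcases ih4 x hx with h | h
        · rcases (PySem.Set.mem_add rm t x).mp h with h' | h'
          · exact Or.inl h'
          · exact Or.inr (by rw [List.map_cons]; exact List.mem_cons.mpr (Or.inl h'))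
        · exact Or.inr (by rw [List.map_cons]; exact List.mem_cons_of_mem _ h)

-- A's whole while-loop for one player batch equals a single passT (its body runs at most once)
lemma whileA_pass (p ans pc : Int) (T : List (Int × Int))
    (hpc : 1 ≤ pc) (hcnt : ∀ kv ∈ T, 1 ≤ kv.2) (hnd : (T.map Prod.fst).Nodup) :
    whileA p ans pc (PySem.Dict.mk T)
      = (ans + (passT p pc T).1, PySem.Dict.mk (passT p pc T).2) := by
  by_cases hT : T = []
  · subst hT
    rw [whileA]
    simp [passT]
  · obtain ⟨h1, h2, _, _⟩ := forA_sim p T ans pc [] hpc hcnt hnd (by simp)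
    have hpost := forA_post p T ans pc []
    rw [whileA]
    rw [if_pos ⟨by simpa using hT, by omega⟩]
    simp only
    rw [whileA]
    rw [if_neg ?_]
    · refine Prod.ext h1 (PySem.Dict.ext ?_)
      rw [eraseFold_items]
      exact h2
    · intro ⟨hne, hpc'⟩
      rcases hpost.2 with hz | hall
      · exact hpc' hz
      · apply hne
        rw [eraseFold_items, List.filter_eq_nil_iff]
        intro kv hkv
        simp only [Bool.not_eq_true', Bool.not_eq_false]
        exact List.contains_iff_mem.mpr (hall kv hkv)

-- fold over the player batches: A's main loop equals gMatch on the expanded lists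
lemma fold_while : ∀ (LP : List (Int × Int)) (ans : Int) (T : List (Int × Int)),
    (∀ kv ∈ LP, 1 ≤ kv.2) → (∀ kv ∈ T, 1 ≤ kv.2) → (T.map Prod.fst).Nodup →
    (LP.foldl (fun (st : Int × PySem.Dict Int Int) kv => whileA kv.1 st.1 kv.2 st.2)
      (ans, PySem.Dict.mk T)).1 = ans + gMatch (expand LP) (expand T) := by
  intro LP
  induction LP with
  | nil => intro ans T _ _ _; simp [expand, gMatch_nil_left]
  | cons hd LP ih =>
    intro ans T hp hcnt hnd
    obtain ⟨pk, c⟩ := hd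
    have hc : (1:Int) ≤ c := hp (pk, c) List.mem_cons_self
    rw [List.foldl_cons]
    simp only
    rw [whileA_pass pk ans c T hc hcnt hnd]
    rw [ih _ _ (fun kv hkv => hp kv (List.mem_cons_of_mem _ hkv))
      (passT_counts pk T c hcnt)
      ((passT_keys_sublist pk T c).nodup hnd)]
    have : expand ((pk, c) :: LP) = List.replicate c.toNat pk ++ expand LP := by simp [expand]
    rw [this, gMatch_pass pk T c (expand LP) hc hcnt]
    ring

-- — characterisation of the sorted counters —

lemma insertBy_congr {α : Type} (b1 b2 : α → α → Bool) (x : α) :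
    ∀ (acc : List α), (∀ y ∈ acc, b1 x y = b2 x y) →
    PySem.List.insertBy b1 x acc = PySem.List.insertBy b2 x acc := by
  intro acc
  induction acc with
  | nil => intro _; rfl
  | cons y ys ih =>
    intro h
    simp only [PySem.List.insertBy]
    rw [h y List.mem_cons_self, ih (fun z hz => h z (List.mem_cons_of_mem _ hz))]

lemma mem_insertBy' {α : Type} (b : α → α → Bool) (x : α) :
    ∀ (acc : List α) (y : α), y ∈ PySem.List.insertBy b x acc → y = x ∨ y ∈ acc := by
  intro acc
  induction acc with
  | nil => intro y hy; simp [PySem.List.insertBy] at hy; exact Or.inl hy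
  | cons z zs ih =>
    intro y hy
    simp only [PySem.List.insertBy] at hy
    split at hy
    · rcases List.mem_cons.mp hy with h | h
      · exact Or.inl h
      · exact Or.inr h
    · rcases List.mem_cons.mp hy with h | h
      · exact Or.inr (by simp [h])
      · rcases ih y h with h' | h'
        · exact Or.inl h'
        · exact Or.inr (List.mem_cons_of_mem _ h')

lemma foldl_insertBy_congr {α : Type} (f : α → Int) (b1 b2 : α → α → Bool)
    (hagree : ∀ x y, f x ≠ f y → b1 x y = b2 x y) :
    ∀ (xs acc : List α), (xs.map f).Nodup → (∀ x ∈ xs, ∀ y ∈ acc, f x ≠ f y) →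
    xs.foldl (fun acc x => PySem.List.insertBy b1 x acc) acc
      = xs.foldl (fun acc x => PySem.List.insertBy b2 x acc) acc := by
  intro xs
  induction xs with
  | nil => intro acc _ _; rfl
  | cons x xs ih =>
    intro acc hnd hdisj
    simp only [List.foldl_cons]
    rw [insertBy_congr b1 b2 x acc (fun y hy => hagree x y (hdisj x List.mem_cons_self y hy))]
    apply ih
    · rw [List.map_cons, List.nodup_cons] at hnd
      exact hnd.2
    · rw [List.map_cons, List.nodup_cons] at hnd
      intro x' hx' y hy
      rcases mem_insertBy' b2 x acc y hy with rfl | hy'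
      · intro heq
        exact hnd.1 (heq ▸ List.mem_map_of_mem hx')
      · exact hdisj x' (List.mem_cons_of_mem _ hx') y hy'

-- on a list with distinct first components, Python's tuple sort is the sort by first component
lemma sorted2_eq_sorted_fst (l : List (Int × Int)) (hnd : (l.map Prod.fst).Nodup) :
    PySem.List.sorted2 l Prod.fst Prod.snd = PySem.List.sorted l Prod.fst := by
  rw [PySem.List.sorted_eq_foldl_insertBy]
  simp only [PySem.List.sorted2, if_neg (by decide : ¬ (false = true))]
  apply foldl_insertBy_congr Prod.fst _ _ ?_ l [] hnd (by simp)
  intro x y hne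
  by_cases h : x.1 < y.1
  · simp [h]
  · have : y.1 < x.1 := by omega
    simp [h, this]

lemma map_fst_counter_items (xs : List Int) :
    ((PySem.Dict.counter xs).items.map Prod.fst) = PySem.Set.ofList xs := by
  rw [PySem.Dict.items_counter, List.map_map]
  have h : (Prod.fst ∘ fun k : Int => (k, (xs.count k : Int))) = id := by funext k; rfl
  rw [h, List.map_id]

lemma sorted_counter_nodup_fst (xs : List Int) :
    ((PySem.List.sorted2 (PySem.Dict.counter xs).items Prod.fst Prod.snd).map Prod.fst).Nodup := by
  have hperm : ((PySem.List.sorted2 (PySem.Dict.counter xs).items Prod.fst Prod.snd).map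
      Prod.fst).Perm ((PySem.Dict.counter xs).items.map Prod.fst) :=
    (PySem.List.sorted2_perm _ _ _ _).map _
  rw [List.Perm.nodup_iff hperm, map_fst_counter_items]
  exact PySem.Set.nodup_ofList xs

lemma sorted_counter_counts (xs : List Int) :
    ∀ kv ∈ PySem.List.sorted2 (PySem.Dict.counter xs).items Prod.fst Prod.snd, (1:Int) ≤ kv.2 := by
  intro kv hkv
  have hmem : kv ∈ (PySem.Dict.counter xs).items :=
    (PySem.List.sorted2_perm _ _ _ _).mem_iff.mp hkv
  rw [PySem.Dict.items_counter] at hmem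
  obtain ⟨k, hk, rfl⟩ := List.mem_map.mp hmem
  have : k ∈ xs := (PySem.Set.mem_ofList xs k).mp hk
  have : 1 ≤ xs.count k := List.count_pos_iff.mpr this
  simp only
  exact_mod_cast this

lemma items_ofList_nodup (l : List (Int × Int)) (hnd : (l.map Prod.fst).Nodup) :
    (PySem.Dict.ofList l).items = l := by
  have hc : ∀ a ∈ l, (PySem.Dict.empty : PySem.Dict Int Int).contains a.1 = false := by
    intro a _; exact PySem.Dict.contains_empty a.1
  have h := PySem.Dict.items_foldl_insert_fresh l Prod.fst Prod.snd PySem.Dict.empty hc hnd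
  show (List.foldl (fun acc p => acc.insert p.1 p.2) PySem.Dict.empty l).items = l
  exact h.trans (by simp [PySem.Dict.empty])

-- — expand (sorted2 (counter xs).items) = sorted xs —

lemma count_expand_map (xs : List Int) : ∀ (S : List Int), S.Nodup → ∀ (y : Int),
    (expand (S.map (fun k => (k, (xs.count k : Int))))).count y
      = if y ∈ S then xs.count y else 0 := by
  intro S
  induction S with
  | nil => intro _ y; simp [expand]
  | cons k S ih =>
    intro hnd y
    have hnd' := List.nodup_cons.mp hnd
    simp only [List.map_cons, expand, List.flatMap_cons, List.count_append]
    rw [show (List.flatMap (fun kv => List.replicate kv.2.toNat kv.1)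
        (S.map fun k => (k, (xs.count k : Int)))) = expand (S.map fun k => (k, (xs.count k : Int)))
      from rfl, ih hnd'.2 y]
    simp only [Int.toNat_natCast, List.count_replicate]
    by_cases hky : k = y
    · subst hky
      have : k ∉ S := hnd'.1
      simp [this]
    · simp [hky, Ne.symm hky]

lemma expand_perm (xs : List Int) :
    (expand (PySem.List.sorted2 (PySem.Dict.counter xs).items Prod.fst Prod.snd)).Perm xs := by
  have h1 : (expand (PySem.List.sorted2 (PySem.Dict.counter xs).items Prod.fst Prod.snd)).Perm
      (expand (PySem.Dict.counter xs).items) :=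
    List.Perm.flatMap (PySem.List.sorted2_perm _ _ _ _) (fun a _ => List.Perm.refl _)
  refine h1.trans ?_
  rw [PySem.Dict.items_counter]
  rw [List.perm_iff_count]
  intro y
  rw [count_expand_map xs (PySem.Set.ofList xs) (PySem.Set.nodup_ofList xs) y]
  by_cases hy : y ∈ xs
  · rw [if_pos ((PySem.Set.mem_ofList xs y).mpr hy)]
  · rw [if_neg (fun h => hy ((PySem.Set.mem_ofList xs y).mp h))]
    exact (List.count_eq_zero.mpr hy).symm

lemma mem_expand (l : List (Int × Int)) (x : Int) (hx : x ∈ expand l) :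
    ∃ kv ∈ l, x = kv.1 := by
  simp only [expand, List.mem_flatMap] at hx
  obtain ⟨kv, hkv, hmem⟩ := hx
  exact ⟨kv, hkv, (List.eq_of_mem_replicate hmem)⟩

lemma expand_pairwise (l : List (Int × Int)) (h : l.Pairwise (fun a b => a.1 ≤ b.1)) :
    (expand l).Pairwise (· ≤ ·) := by
  induction l with
  | nil => simp [expand]
  | cons hd rest ih =>
    have h' := List.pairwise_cons.mp h
    simp only [expand, List.flatMap_cons]
    rw [List.pairwise_append]
    refine ⟨?_, ih h'.2, ?_⟩
    · rw [List.pairwise_replicate]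
      exact Or.inr le_rfl
    · intro a ha b hb
      have ha' : a = hd.1 := List.eq_of_mem_replicate ha
      obtain ⟨kv, hkv, rfl⟩ := mem_expand rest b hb
      rw [ha']
      exact h'.1 kv hkv

lemma expand_sorted_counter (xs : List Int) :
    expand (PySem.List.sorted2 (PySem.Dict.counter xs).items Prod.fst Prod.snd)
      = PySem.List.sorted xs (fun x => x) := by
  symm
  apply PySem.List.sorted_id_eq_of_perm_of_pairwise
  · exact expand_perm xs
  · apply expand_pairwise
    rw [sorted2_eq_sorted_fst _ (by
      rw [map_fst_counter_items]; exact PySem.Set.nodup_ofList xs)]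
    exact PySem.List.sorted_pairwise _ _

-- — B's fold equals gMatch —

lemma altGo_foldl (ts : List Int) : ∀ (ps : List Int) (i : Nat) (ans : Int),
    (ts.foldl (altGo ps) (i, ans)).2 = ans + gMatch (ps.drop i) ts := by
  induction ts with
  | nil => intro ps i ans; simp [gMatch_nil_right]
  | cons t ts ih =>
    intro ps i ans
    rw [List.foldl_cons]
    by_cases hi : i < ps.length
    · have hdrop : ps.drop i = ps[i] :: ps.drop (i + 1) := List.drop_eq_getElem_cons hi
      have hgetD : ps.getD i 0 = ps[i] := List.getD_eq_getElem ps 0 hi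
      by_cases hle : ps[i] ≤ t
      · rw [show altGo ps (i, ans) t = (i + 1, ans + 1) from by
          unfold altGo; rw [if_pos ⟨hi, by rw [hgetD]; exact hle⟩]]
        rw [ih ps (i + 1) (ans + 1), hdrop, gMatch, if_pos hle]
        ring
      · rw [show altGo ps (i, ans) t = (i, ans) from by
          unfold altGo; rw [if_neg (fun h => hle (by rw [← hgetD]; exact h.2))]]
        rw [ih ps i ans, hdrop, gMatch, if_neg hle, ← hdrop]
    · have hdrop : ps.drop i = [] := List.drop_eq_nil_of_le (by omega)
      rw [show altGo ps (i, ans) t = (i, ans) from by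
        unfold altGo; rw [if_neg (fun h => hi h.1)]]
      rw [ih ps i ans, hdrop, gMatch_nil_left, gMatch_nil_left]

-- ===== VERDICT (by name: the statement is the Claim_ definition above) =====
theorem using_dicts_spec : Claim_equal_using_dicts := by
  intro players trainers _
  unfold Spec_using_dicts using_dicts using_dicts_alt
  simp only
  rw [items_ofList_nodup _ (sorted_counter_nodup_fst players)]
  have hmk : PySem.Dict.ofList
      (PySem.List.sorted2 (PySem.Dict.counter trainers).items Prod.fst Prod.snd)
      = PySem.Dict.mk (PySem.List.sorted2 (PySem.Dict.counter trainers).items Prod.fst Prod.snd) := by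
    apply PySem.Dict.ext
    rw [items_ofList_nodup _ (sorted_counter_nodup_fst trainers)]
  rw [hmk]
  rw [fold_while _ 0 _ (sorted_counter_counts players) (sorted_counter_counts trainers)
    (sorted_counter_nodup_fst trainers)]
  rw [expand_sorted_counter players, expand_sorted_counter trainers]
  rw [altGo_foldl _ _ 0 0]
  simp
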